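-- pv_equiv track=rewrite | github.com/maxjmohr/adventofcode-2025 | day_06/main.py | divide_into_lists
-- ===== SOURCE A (Python) =====
-- def divide_into_lists(input: list[list[str]]) -> tuple[list[str], list[str]]:
--     """Divide the input into two lists, one for the plus symbol and one for the product symbol, by looking at the last row of the input"""
--     plus_list: list[str] = []
--     product_list: list[str] = []
--
--     for i in range(len(input[0])):
--         if input[-1][i] == "+":
--             plus_list.append("".join(input[j][i] for j in range(len(input) - 1)))
--         elif input[-1][i] == "*":
--             product_list.append("".join(input[j][i] for j in range(len(input) - 1)))
--
--     # Delete all empty strings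
--     plus_list = [value for value in plus_list if value.strip() != ""]
--     product_list = [value for value in product_list if value.strip() != ""]
--
--     return plus_list, product_list
-- ===== SOURCE B (Python) =====
-- def divide_into_lists(input: list[list[str]]) -> tuple[list[str], list[str]]:
--     """Divide the input into two lists, one for the plus symbol and one for the product symbol, by looking at the last row of the input"""
--     last = input[-1]
--     # select the symbol columns once, each with an empty accumulator
--     acc = [(i, last[i], "") for i in range(len(input[0])) if last[i] in ("+", "*")]
--     # one row-major pass: extend every selected column's accumulator with this row's cell
--     for row in input[:-1]:
--         acc = [(i, s, body + row[i]) for i, s, body in acc]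
--     plus_list = [body for _, s, body in acc if s == "+" and body.strip() != ""]
--     product_list = [body for _, s, body in acc if s == "*" and body.strip() != ""]
--     return plus_list, product_list
-- ===== Notes on version B (the rewrite author's own statement) =====
-- stated objective: alternative
-- what changed: B replaces A's column-major nested scan (for each column, an inner join over all rows) by a row-major single pass: it selects the symbol columns from the last row once, then folds over the body rows extending all selected column accumulators simultaneously, and finally partitions the accumulators.
import Mathlib
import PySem

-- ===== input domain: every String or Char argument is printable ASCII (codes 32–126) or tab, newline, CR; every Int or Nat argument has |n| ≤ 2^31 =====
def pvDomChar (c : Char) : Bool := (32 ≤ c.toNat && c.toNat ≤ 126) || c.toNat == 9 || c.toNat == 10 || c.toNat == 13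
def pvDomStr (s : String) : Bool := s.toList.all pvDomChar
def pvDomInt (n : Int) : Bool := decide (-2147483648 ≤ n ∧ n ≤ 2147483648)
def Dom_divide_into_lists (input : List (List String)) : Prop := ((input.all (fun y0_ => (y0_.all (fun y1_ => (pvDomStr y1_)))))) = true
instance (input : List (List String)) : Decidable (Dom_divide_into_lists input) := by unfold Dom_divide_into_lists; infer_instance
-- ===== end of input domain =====

-- B replaces A's column-major nested scan (per-column inner join over rows) by a row-major
-- single pass that extends all selected column accumulators at once (alternative; same cost).

-- ===== PORT A =====
def divide_into_lists (input : List (List String)) : List String × List String :=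
  let lists := (List.range ((PySem.List.pyGet? input 0).getD []).length).foldl
    (fun (acc : List String × List String) (i : Nat) =>
      if (PySem.List.pyGet? ((PySem.List.pyGet? input (-1)).getD []) (i : Int)).getD "" = "+" then
        (acc.1 ++ [PySem.Str.join "" ((List.range (input.length - 1)).map
            (fun (j : Nat) => (PySem.List.pyGet? ((PySem.List.pyGet? input (j : Int)).getD []) (i : Int)).getD ""))], acc.2)
      else if (PySem.List.pyGet? ((PySem.List.pyGet? input (-1)).getD []) (i : Int)).getD "" = "*" then
        (acc.1, acc.2 ++ [PySem.Str.join "" ((List.range (input.length - 1)).map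
            (fun (j : Nat) => (PySem.List.pyGet? ((PySem.List.pyGet? input (j : Int)).getD []) (i : Int)).getD ""))])
      else acc) ([], [])
  (lists.1.filter (fun v => PySem.Str.strip v != ""),
   lists.2.filter (fun v => PySem.Str.strip v != ""))

-- ===== PORT B =====
def divide_into_lists_alt (input : List (List String)) : List String × List String :=
  let last := (PySem.List.pyGet? input (-1)).getD []
  -- acc = [(i, last[i], "") for i in range(len(input[0])) if last[i] in ("+", "*")]
  let acc0 : List (Int × String × String) :=
    (List.range ((PySem.List.pyGet? input 0).getD []).length).filterMap
      (fun (i : Nat) =>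
        let s := (PySem.List.pyGet? last (i : Int)).getD ""
        if s = "+" ∨ s = "*" then some ((i : Int), s, "") else none)
  -- for row in input[:-1]: acc = [(i, s, body + row[i]) for i, s, body in acc]
  let acc := (PySem.List.slice input none (some (-1))).foldl
      (fun acc row => acc.map
        (fun (t : Int × String × String) =>
          (t.1, t.2.1, t.2.2 ++ (PySem.List.pyGet? row t.1).getD "")))
      acc0
  (acc.filterMap (fun t => if t.2.1 = "+" ∧ PySem.Str.strip t.2.2 ≠ "" then some t.2.2 else none),
   acc.filterMap (fun t => if t.2.1 = "*" ∧ PySem.Str.strip t.2.2 ≠ "" then some t.2.2 else none))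

-- ===== PRECONDITION & SPEC =====
-- Pre_ excludes exactly the inputs on which the Python A raises IndexError: empty input, a last
-- row shorter than row 0, or a '+'/'*' column index out of range in some row.
def Pre_divide_into_lists (input : List (List String)) : Prop :=
  input ≠ [] ∧ ∀ i < (input.headD []).length,
    i < (input.getLastD []).length ∧
    (((input.getLastD []).getD i "" = "+" ∨ (input.getLastD []).getD i "" = "*") →
      ∀ row ∈ input, i < row.length)
instance (input : List (List String)) : Decidable (Pre_divide_into_lists input) := by
  unfold Pre_divide_into_lists; infer_instance

def pvWitness_divide_into_lists : List (List String) := [["1", "2", " "], ["3", "4", "5"], ["+", "*", "+"]]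

def Spec_divide_into_lists (input : List (List String)) (out : List String × List String) : Prop := out = divide_into_lists_alt input
instance (input : List (List String)) (out : List String × List String) : Decidable (Spec_divide_into_lists input out) := by unfold Spec_divide_into_lists; infer_instance

-- ===== CLAIM (what is proved, stated in full; the proofs are below) =====
def Claim_equal_divide_into_lists : Prop := ∀ (input : List (List String)), Dom_divide_into_lists input → Pre_divide_into_lists input → Spec_divide_into_lists input (divide_into_lists input)

-- ===== LEMMAS AND PROOFS =====

-- the symbol-row entry and the joined column body at column i; the common normal form 'part'
def symA (input : List (List String)) (i : Nat) : String := (input.getLast?.getD [])[i]?.getD ""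
def gcol (input : List (List String)) (i : Nat) : String :=
  PySem.Str.join "" (input.dropLast.map (fun r => r[i]?.getD ""))
def part (input : List (List String)) (L : Nat) : List String × List String :=
  (((List.range L).filter (fun i => symA input i == "+")).map (gcol input)
      |>.filter (fun v => PySem.Str.strip v != ""),
   ((List.range L).filter (fun i => symA input i == "*")).map (gcol input)
      |>.filter (fun v => PySem.Str.strip v != ""))

-- A's loop with two conditional appends, in closed form
theorem loop_eq (s g : Nat → String) (l : List Nat) (acc : List String × List String) :
    l.foldl (fun acc i =>
      if s i = "+" then (acc.1 ++ [g i], acc.2)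
      else if s i = "*" then (acc.1, acc.2 ++ [g i])
      else acc) acc
    = (acc.1 ++ (l.filter (fun i => s i == "+")).map g,
       acc.2 ++ (l.filter (fun i => s i == "*")).map g) := by
  induction l generalizing acc with
  | nil => simp
  | cons x t ih =>
    simp only [List.foldl_cons, List.filter_cons]
    by_cases h1 : s x = "+"
    · have h2 : ¬ s x = "*" := by rw [h1]; simp
      simp [h1, ih]
    · by_cases h2 : s x = "*" <;> simp [h1, h2, ih]

theorem colbody (input : List (List String)) (i : Nat) :
    (List.range (input.length - 1)).map
      (fun j => (input[j]?.getD [])[i]?.getD "")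
    = input.dropLast.map (fun r => r[i]?.getD "") := by
  have ht : (List.range (input.length - 1)).map (fun j => input[j]?.getD [])
      = input.dropLast := by
    apply List.ext_getElem
    · simp
    · intro j h1 h2
      simp only [List.getElem_map, List.getElem_range, List.getElem_dropLast]
      rw [List.getElem?_eq_getElem (by simp at h1 ⊢; omega)]
      rfl
  rw [← ht, List.map_map]
  simp only [Function.comp_def]

theorem A_eq (input : List (List String)) :
    divide_into_lists input = part input ((PySem.List.pyGet? input 0).getD []).length := by
  unfold divide_into_lists
  simp only [PySem.List.pyGet?_neg_one, PySem.List.pyGet?_natCast]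
  rw [loop_eq (fun i => (input.getLast?.getD [])[i]?.getD "")
      (fun i => PySem.Str.join "" ((List.range (input.length - 1)).map
        (fun j => (input[j]?.getD [])[i]?.getD "")))]
  simp only [List.nil_append, colbody]
  unfold part symA gcol
  rfl

-- empty-separator join concatenates; a left fold of appends equals the join of the mapped list
theorem chars_join_nil (l : List (List Char)) : PySem.Chars.join [] l = l.flatten := by
  unfold PySem.Chars.join
  induction l with
  | nil => simp [List.intercalate]
  | cons a t ih =>
    cases t with
    | nil => simp [List.intercalate]
    | cons b u =>
      simp [List.intercalate] at ih ⊢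
      simpa using ih

theorem join_nil_cons (x : String) (l : List String) :
    PySem.Str.join "" (x :: l) = x ++ PySem.Str.join "" l := by
  apply String.toList_injective
  simp [PySem.Str.join, chars_join_nil]

theorem fold_append_join {α : Type} (f : α → String) (rs : List α) (b0 : String) :
    rs.foldl (fun b r => b ++ f r) b0 = b0 ++ PySem.Str.join "" (rs.map f) := by
  induction rs generalizing b0 with
  | nil =>
    apply String.toList_injective
    simp [PySem.Str.join]
  | cons r t ih =>
    simp only [List.foldl_cons, List.map_cons, join_nil_cons, ih, String.append_assoc]

-- B's row fold, pulled inside each accumulator entry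
theorem fold_map_eq (rs : List (List String)) (acc0 : List (Int × String × String)) :
    rs.foldl (fun acc row => acc.map
        (fun (t : Int × String × String) =>
          (t.1, t.2.1, t.2.2 ++ (PySem.List.pyGet? row t.1).getD ""))) acc0
    = acc0.map (fun t => (t.1, t.2.1,
        rs.foldl (fun b row => b ++ (PySem.List.pyGet? row t.1).getD "") t.2.2)) := by
  induction rs generalizing acc0 with
  | nil => simp
  | cons r t ih =>
    simp only [List.foldl_cons, ih, List.map_map]
    rfl

-- filter-map-filter as one filterMap
theorem filter_map_filter {α β : Type} (p : α → Bool) (f : α → β) (q : β → Bool) (l : List α) :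
    ((l.filter p).map f).filter q
    = l.filterMap (fun x => if p x ∧ q (f x) then some (f x) else none) := by
  induction l with
  | nil => simp
  | cons x t ih =>
    simp only [List.filter_cons, List.filterMap_cons]
    by_cases hp : p x
    · by_cases hq : q (f x) <;> simp [hp, hq, ih]
    · simp [hp, ih]

theorem B_eq (input : List (List String)) :
    divide_into_lists_alt input = part input ((PySem.List.pyGet? input 0).getD []).length := by
  unfold divide_into_lists_alt
  simp only [PySem.List.slice_to_neg_one, fold_map_eq, List.filterMap_map,
    PySem.List.pyGet?_neg_one]
  unfold part
  rw [filter_map_filter, filter_map_filter]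
  simp only [List.filterMap_filterMap, Prod.mk.injEq]
  constructor <;>
  · apply List.filterMap_congr
    intro i _
    simp only [PySem.List.pyGet?_natCast]
    by_cases h : symA input i = "+" ∨ symA input i = "*" <;>
      rcases h' : symA input i == "+" <;>
        simp_all [symA, gcol, fold_append_join (fun r => r[i]?.getD "") input.dropLast ""]

-- ===== VERDICT (by name: the statement is the Claim_ definition above) =====
theorem divide_into_lists_spec : Claim_equal_divide_into_lists := by
  intro input _ _
  unfold Spec_divide_into_lists
  rw [A_eq, B_eq]
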